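-- pv_equiv track=rewrite | github.com/953250587/leetcode-python | LongestWordInDictionaryThroughDeleting_MID_524.py | findLongestWord_1
-- ===== SOURCE A (Python) =====
-- def findLongestWord_1(s, d):
--     """
--     :type s: str
--     :type d: List[str]
--     :rtype: str
--     115ms
--     """
--     d.sort(key=lambda x: (-len(x), x))
--     d.append('')
--     S = len(s)
--
--     def isSubsequence(t):
--         i = 0
--         for c in t:
--             i = s.find(c, i) + 1
--             if i <= 0:
--                 return False
--         return True
--
--     return next(x for x in d if isSubsequence(x))
--
-- s = "apple"
--
-- d = ["zxc","vbn"]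
-- ===== SOURCE B (Python) =====
-- def findLongestWord_1(s, d):
--     pos = {}
--     for idx, c in enumerate(s):
--         pos.setdefault(c, []).append(idx)
--
--     def is_sub(t):
--         i = 0
--         for c in t:
--             ps = pos.get(c, [])
--             lo, hi = 0, len(ps)
--             while lo < hi:
--                 mid = (lo + hi) // 2
--                 if ps[mid] < i:
--                     lo = mid + 1
--                 else:
--                     hi = mid
--             if lo == len(ps):
--                 return False
--             i = ps[lo] + 1
--         return True
--
--     best = ''
--     for x in d:
--         if (len(x) > len(best) or (len(x) == len(best) and x < best)) and is_sub(x):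
--             best = x
--     return best
-- ===== Notes on version B (the rewrite author's own statement) =====
-- stated objective: alternative
-- what changed: B replaces A's sort-by-(-len,word)-then-first-match (with str.find-based subsequence tests) by a single best-tracking pass over d under the same (-len,word) order, testing candidates against a precomputed char->positions index with hand-written binary search (measured around 1.5-1.7x faster at the largest timing sizes, below the consistent threshold, so no speed is claimed).
import Mathlib
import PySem

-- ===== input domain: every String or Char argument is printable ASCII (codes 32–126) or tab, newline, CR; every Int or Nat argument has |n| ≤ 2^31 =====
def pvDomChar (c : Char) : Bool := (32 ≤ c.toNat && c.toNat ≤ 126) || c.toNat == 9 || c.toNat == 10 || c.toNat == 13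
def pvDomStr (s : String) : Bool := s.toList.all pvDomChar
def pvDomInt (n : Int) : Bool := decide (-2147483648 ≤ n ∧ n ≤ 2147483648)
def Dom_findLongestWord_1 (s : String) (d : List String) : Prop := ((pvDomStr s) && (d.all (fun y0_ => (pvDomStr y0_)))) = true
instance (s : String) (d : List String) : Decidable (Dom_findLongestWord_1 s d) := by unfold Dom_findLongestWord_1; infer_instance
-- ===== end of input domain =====

-- B replaces A's sort-by-(-len, word)-then-first-match with a single best-tracking pass whose
-- subsequence test uses a precomputed char->positions index with binary search; equal return value
-- (note: Python A mutates d in place — it sorts it and appends '' — the equivalence proved here is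
-- about the return value only).

-- ===== PORT A =====
-- isSubsequence: 'i = 0; for c in t: i = s.find(c, i) + 1; if i <= 0: return False; return True'
def pvIsSubA (s : String) : List Char → Int → Bool
  | [], _ => true
  | c :: rest, i =>
    let i' := PySem.Str.findFrom s (String.ofList [c]) i + 1
    if i' ≤ 0 then false else pvIsSubA s rest i'

def findLongestWord_1 (s : String) (d : List String) : String :=
  -- d.sort(key=lambda x: (-len(x), x)); d.append(''); next(x for x in d if isSubsequence(x))
  -- ('' always passes the check, so next() always finds an element; getD's default is unreachable)
  ((PySem.List.sorted2 d (fun x => -PySem.Str.len x) (fun x => x) ++ [""]).find?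
      (fun x => pvIsSubA s x.toList 0)).getD ""

-- ===== PORT B =====
-- pos = {}; for idx, c in enumerate(s): pos.setdefault(c, []).append(idx)
def pvPos (sl : List Char) : PySem.Dict Char (List Int) :=
  (PySem.List.enumerate sl 0).foldl (fun d p => d.modify p.2 [] (· ++ [p.1])) PySem.Dict.empty

-- while lo < hi: mid = (lo + hi) // 2; if ps[mid] < i: lo = mid + 1 else: hi = mid
-- (ps[mid] is always in range, so pyGetD's default is unreachable)
def pvBisect (ps : List Int) (i : Int) (lo hi : Nat) : Nat :=
  if lo < hi then
    let mid := (lo + hi) / 2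
    if PySem.List.pyGetD ps (mid : Int) 0 < i then pvBisect ps i (mid + 1) hi
    else pvBisect ps i lo mid
  else lo
termination_by hi - lo
decreasing_by all_goals omega

-- is_sub: 'for c in t: ps = pos.get(c, []); <binary search>; if lo == len(ps): return False; i = ps[lo] + 1'
def pvIsSubB (pos : PySem.Dict Char (List Int)) : List Char → Int → Bool
  | [], _ => true
  | c :: rest, i =>
    let ps := pos.getD c []
    let lo := pvBisect ps i 0 ps.length
    if lo = ps.length then false
    else pvIsSubB pos rest (PySem.List.pyGetD ps (lo : Int) 0 + 1)

def findLongestWord_1_alt (s : String) (d : List String) : String :=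
  let pos := pvPos s.toList
  d.foldl (fun best x =>
    if (decide (PySem.Str.len x > PySem.Str.len best)
          || (PySem.Str.len x == PySem.Str.len best && decide (x < best)))
        && pvIsSubB pos x.toList 0
    then x else best) ""

-- ===== PRECONDITION & SPEC =====
def Spec_findLongestWord_1 (s : String) (d : List String) (out : String) : Prop := out = findLongestWord_1_alt s d
instance (s : String) (d : List String) (out : String) : Decidable (Spec_findLongestWord_1 s d out) := by unfold Spec_findLongestWord_1; infer_instance

-- ===== CLAIM (what is proved, stated in full; the proofs are below) =====
def Claim_equal_findLongestWord_1 : Prop := ∀ (s : String) (d : List String), Dom_findLongestWord_1 s d → Spec_findLongestWord_1 s d (findLongestWord_1 s d)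

-- ===== LEMMAS AND PROOFS =====

-- the common spec of both subsequence checks: greedy 'is t a subsequence of l'
def pvSub : List Char → List Char → Bool
  | [], _ => true
  | _ :: _, [] => false
  | c :: t, x :: l => if c = x then pvSub t l else pvSub (c :: t) l

-- Python's sort key (-len(x), x), as a lexicographic pair
def pvK (x : String) : Lex (Int × String) := toLex (-PySem.Str.len x, x)

theorem pvK_inj {a b : String} (h : pvK a = pvK b) : a = b := by
  unfold pvK at h
  exact congrArg Prod.snd (by exact congrArg (fun z => ofLex z) h)

theorem pvK_le_top (y : String) : pvK y ≤ pvK "" := by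
  rcases eq_or_ne y "" with rfl | h
  · exact le_refl _
  · have hy : y.toList ≠ [] := by simpa [String.toList_eq_nil_iff] using h
    have hlen : 0 < y.toList.length := List.length_pos_iff.mpr hy
    rw [pvK, pvK, Prod.Lex.le_iff]
    left
    simp [PySem.Str.len_eq]
    simpa [String.length_toList] using hlen

-- B's 'better than best so far' test is exactly strict order under the key pvK
theorem pvBetter_eq (a b : String) :
    (decide (PySem.Str.len a > PySem.Str.len b)
      || (PySem.Str.len a == PySem.Str.len b && decide (a < b)))
    = decide (pvK a < pvK b) := by
  have hbeq : ((a.length : Int) == (b.length : Int)) = decide (a.length = b.length) := by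
    cases hq : decide (a.length = b.length)
    · simp only [decide_eq_false_iff_not] at hq
      simp; omega
    · simp only [decide_eq_true_eq] at hq
      simp [hq]
  simp [pvK, Prod.Lex.lt_iff, hbeq]

-- A's sort comparator (tuple key) is exactly strict order under pvK
theorem pvBefore_eq :
    (fun (a b : String) => decide (-PySem.Str.len a < -PySem.Str.len b)
      || (!decide (-PySem.Str.len b < -PySem.Str.len a) && decide (a < b)))
    = (fun a b => decide (pvK a < pvK b)) := by
  funext a b
  apply Bool.eq_iff_iff.mpr
  simp [pvK, Prod.Lex.lt_iff]
  by_cases hab : a.toList < b.toList <;> simp [hab] <;> omega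

theorem pvSorted2_eq (d : List String) :
    PySem.List.sorted2 d (fun x => -PySem.Str.len x) (fun x => x)
      = PySem.List.sorted d pvK := by
  show List.foldl (fun acc x => PySem.List.insertBy
      (fun a b => decide (-PySem.Str.len a < -PySem.Str.len b)
        || (!decide (-PySem.Str.len b < -PySem.Str.len a) && decide (a < b))) x acc) [] d
    = List.foldl (fun acc x => PySem.List.insertBy (fun a b => decide (pvK a < pvK b)) x acc) [] d
  rw [pvBefore_eq]

theorem pvSub_not_mem {c : Char} : ∀ {l : List Char}, c ∉ l → ∀ (t : List Char),
    pvSub (c :: t) l = false := by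
  intro l
  induction l with
  | nil => intro _ t; rfl
  | cons x l ih =>
    intro h t
    have hcx : c ≠ x := by simp at h; exact h.1
    have hcl : c ∉ l := by simp at h; exact h.2
    simp [pvSub, hcx, ih hcl]

theorem pvSub_first {c : Char} : ∀ {j : Nat} {l : List Char} (hj : j < l.length),
    l[j] = c → (∀ k, (hk : k < j) → l[k]'(by omega) ≠ c) → ∀ (t : List Char),
    pvSub (c :: t) l = pvSub t (l.drop (j + 1)) := by
  intro j
  induction j with
  | zero =>
    intro l hj hc _ t
    match l, hj with
    | x :: l', _ =>
      simp at hc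
      simp [pvSub, hc]
  | succ j ih =>
    intro l hj hc hmin t
    match l, hj with
    | x :: l', hj =>
      have hx : c ≠ x := fun h => (hmin 0 (by omega)) h.symm
      have : pvSub (c :: t) (x :: l') = pvSub (c :: t) l' := by simp [pvSub, hx]
      rw [this]
      have := ih (l := l') (by simpa using hj) (by simpa using hc)
        (fun k hk => by have := hmin (k+1) (by omega); simpa using this) t
      simpa using this

theorem pvSingleton_infix {c : Char} {l : List Char} : [c] <:+: l ↔ c ∈ l := by
  constructor
  · intro h; exact h.mem (by simp)
  · intro h
    obtain ⟨l1, l2, rfl⟩ := List.append_of_mem h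
    exact ⟨l1, l2, by simp⟩

-- A's find-based scan computes the greedy subsequence test
theorem pvIsSubA_eq (s : String) : ∀ (t : List Char) (k : Nat), k ≤ s.toList.length →
    pvIsSubA s t (k : Int) = pvSub t (s.toList.drop k) := by
  intro t
  induction t with
  | nil => intro k _; simp [pvIsSubA, pvSub]
  | cons c rest ih =>
    intro k hk
    rw [pvIsSubA]
    have hlist : (String.ofList [c]).toList = [c] := by simp
    rw [PySem.Str.findFrom_eq, hlist]
    rw [PySem.Chars.findFrom_natCast s.toList [c] k hk]
    by_cases hfind : PySem.Chars.find (s.toList.drop k) [c] = -1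
    · rw [if_pos hfind]
      have hnm : c ∉ s.toList.drop k := by
        have := (PySem.Chars.find_eq_neg_one_iff (s.toList.drop k) [c]).mp hfind
        intro hmem
        exact this (pvSingleton_infix.mpr hmem)
      show (if ((-1:Int) + 1 ≤ 0) then false else pvIsSubA s rest ((-1:Int)+1)) = _
      rw [if_pos (by omega), pvSub_not_mem hnm]
    · rw [if_neg hfind]
      have hnn : 0 ≤ PySem.Chars.find (s.toList.drop k) [c] := by
        have := PySem.Chars.neg_one_le_find (s.toList.drop k) [c]
        omega
      obtain ⟨hpre, hmin⟩ := PySem.Chars.find_spec hnn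
      set j := (PySem.Chars.find (s.toList.drop k) [c]).toNat with hjdef
      have hjlt : j < (s.toList.drop k).length := by
        rcases hpre with ⟨r, hr⟩
        have hl := congrArg List.length hr
        have hsl := String.length_toList (s := s)
        simp [List.length_drop] at hl ⊢
        omega
      have hgetj : (s.toList.drop k)[j] = c := by
        rcases hpre with ⟨r, hr⟩
        have := List.drop_eq_getElem_cons hjlt
        rw [this] at hr
        simpa using congrArg (fun z => z.head?) hr.symm
      have hminj : ∀ i, (hi : i < j) → (s.toList.drop k)[i]'(by omega) ≠ c := by
        intro i hi hEq
        apply hmin i hi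
        have hdi : (s.toList.drop k).drop i = c :: (s.toList.drop k).drop (i+1) := by
          rw [List.drop_eq_getElem_cons (by omega), hEq]
        exact ⟨(s.toList.drop k).drop (i+1), by rw [hdi]; rfl⟩
      rw [pvSub_first hjlt hgetj hminj]
      have hfj : PySem.Chars.find (s.toList.drop k) [c] = (j : Int) := by omega
      rw [hfj]
      have hlen' : j < s.toList.length - k := by simpa using hjlt
      show (if ((k:Int) + (j:Int) + 1 ≤ 0) then false else pvIsSubA s rest ((k:Int)+(j:Int)+1)) = _
      rw [if_neg (by omega)]
      have harg : ((k:Int) + (j:Int) + 1) = ((k + j + 1 : Nat) : Int) := by push_cast; ring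
      rw [harg, ih (k + j + 1) (by omega), List.drop_drop]
      congr 1

-- B's binary search returns the first index whose position is ≥ i
theorem pvBisect_spec (ps : List Int) (i : Int)
    (hsort : ∀ (a b : Nat), (hab : a ≤ b) → (hb : b < ps.length) → ps[a]'(by omega) ≤ ps[b]) :
    ∀ (n lo hi : Nat), hi - lo ≤ n → hi ≤ ps.length → lo ≤ hi →
    (∀ k, k < lo → (hk : k < ps.length) → ps[k] < i) →
    (∀ k, hi ≤ k → (hk : k < ps.length) → ¬ ps[k] < i) →
    pvBisect ps i lo hi ≤ ps.length
    ∧ (∀ k, k < pvBisect ps i lo hi → (hk : k < ps.length) → ps[k] < i)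
    ∧ (∀ k, pvBisect ps i lo hi ≤ k → (hk : k < ps.length) → ¬ ps[k] < i) := by
  intro n
  induction n with
  | zero =>
    intro lo hi hn hhi hlh hpre hpost
    rw [pvBisect, if_neg (by omega)]
    exact ⟨by omega, fun k hk hklen => hpre k (by omega) hklen,
      fun k hk hklen => hpost k (by omega) hklen⟩
  | succ n ih =>
    intro lo hi hn hhi hlh hpre hpost
    rw [pvBisect]
    by_cases hlt : lo < hi
    · rw [if_pos hlt]
      have hmlen : (lo + hi) / 2 < ps.length := by omega
      have hgd : PySem.List.pyGetD ps (((lo + hi) / 2 : Nat) : Int) 0 = ps[(lo + hi) / 2] := by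
        rw [PySem.List.pyGetD_eq_getElem ps 0 (by omega) (by push_cast; omega)]
        congr 1
        all_goals omega
      by_cases hget : PySem.List.pyGetD ps (((lo + hi) / 2 : Nat) : Int) 0 < i
      · rw [if_pos hget]
        refine ih ((lo + hi) / 2 + 1) hi (by omega) hhi (by omega) ?_ hpost
        intro k hk hklen
        rcases lt_or_ge k lo with h | h
        · exact hpre k h hklen
        · calc ps[k] ≤ ps[(lo + hi) / 2] := hsort k _ (by omega) hmlen
            _ < i := by rw [hgd] at hget; exact hget
      · rw [if_neg hget]
        refine ih lo ((lo + hi) / 2) (by omega) (by omega) (by omega) hpre ?_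
        intro k hk hklen
        have : ps[(lo + hi) / 2] ≤ ps[k] := hsort _ k hk hklen
        rw [hgd] at hget
        omega
    · rw [if_neg hlt]
      exact ⟨by omega, fun k hk hklen => hpre k (by omega) hklen,
        fun k hk hklen => hpost k (by omega) hklen⟩

-- the position index holds, for each char, the ascending list of its indices in sl
theorem pvPos_getD (sl : List Char) (c : Char) :
    (pvPos sl).getD c [] = ((PySem.List.enumerate sl 0).filter (fun p => p.2 == c)).map (fun p => p.1) := by
  unfold pvPos
  have h1 : (PySem.List.enumerate sl 0).foldl
        (fun (d : PySem.Dict Char (List Int)) (p : Int × Char) => d.modify p.2 [] (· ++ [p.1]))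
        PySem.Dict.empty
      = ((PySem.List.enumerate sl 0).map (fun p => (p.2, p.1))).foldl
        (fun (d : PySem.Dict Char (List Int)) (q : Char × Int) => d.modify q.1 [] (· ++ [q.2]))
        PySem.Dict.empty := by
    rw [List.foldl_map]
  rw [h1, PySem.Dict.getD_foldl_modify_append]
  simp [List.filter_map, Function.comp_def]

theorem pvPos_mem (sl : List Char) (c : Char) (j : Int) :
    j ∈ (pvPos sl).getD c [] ↔ ∃ (k : Nat) (h : k < sl.length), j = (k : Int) ∧ sl[k] = c := by
  rw [pvPos_getD]
  simp only [List.mem_map, List.mem_filter, PySem.List.mem_enumerate_iff]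
  constructor
  · rintro ⟨p, ⟨⟨k, hk, rfl⟩, hc⟩, rfl⟩
    exact ⟨k, hk, by simp, by simpa using hc⟩
  · rintro ⟨k, hk, rfl, hc⟩
    exact ⟨((k : Int), c), ⟨⟨k, hk, by simp [hc]⟩, by simp⟩, rfl⟩

theorem pvPos_sorted (sl : List Char) (c : Char) :
    ((pvPos sl).getD c []).Pairwise (· < ·) := by
  rw [pvPos_getD]
  exact (List.pairwise_map.mpr (((PySem.List.pairwise_lt_enumerate sl 0).filter _).imp (fun h => h)))

theorem pvIsSubB_eq (sl : List Char) : ∀ (t : List Char) (k : Nat), k ≤ sl.length →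
    pvIsSubB (pvPos sl) t (k : Int) = pvSub t (sl.drop k) := by
  intro t
  induction t with
  | nil => intro k _; simp [pvIsSubB, pvSub]
  | cons c rest ih =>
    intro k hk
    rw [pvIsSubB]
    set ps := (pvPos sl).getD c [] with hps
    have hpw : ps.Pairwise (· < ·) := by rw [hps]; exact pvPos_sorted sl c
    have hsort : ∀ (a b : Nat), (hab : a ≤ b) → (hb : b < ps.length) → ps[a]'(by omega) ≤ ps[b] := by
      intro a b hab hb
      rcases eq_or_lt_of_le hab with rfl | hlt
      · exact le_refl _
      · exact le_of_lt ((List.pairwise_iff_getElem.mp hpw) a b (by omega) hb hlt)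
    obtain ⟨b1, b2, b3⟩ := pvBisect_spec ps (k : Int) hsort ps.length 0 ps.length
      (by omega) (le_refl _) (by omega) (by omega) (fun kk hkk hlen => by omega)
    set lo := pvBisect ps (k : Int) 0 ps.length with hlo
    -- every element of ps is a (cast) index of an occurrence of c
    have hmem : ∀ (m : Nat), (hm : m < ps.length) → ∃ (u : Nat) (hu : u < sl.length), ps[m] = (u : Int) ∧ sl[u] = c := by
      intro m hm
      have : ps[m] ∈ ps := List.getElem_mem hm
      rcases (pvPos_mem sl c _).mp this with ⟨u, hu, hju, hcu⟩
      exact ⟨u, hu, hju, hcu⟩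
    by_cases hend : lo = ps.length
    · rw [if_pos hend]
      -- all positions of c are < k, so c ∉ sl.drop k
      have hnm : c ∉ sl.drop k := by
        intro hmem'
        rcases List.getElem_of_mem hmem' with ⟨m, hm, hgm⟩
        have hm' : m < sl.length - k := by simpa using hm
        have hin : ((k + m : Nat) : Int) ∈ ps := by
          rw [hps, pvPos_mem]
          exact ⟨k + m, by omega, rfl, (List.getElem_drop (xs := sl)).symm.trans hgm⟩
        rcases List.getElem_of_mem hin with ⟨idx, hidx, hgidx⟩
        have := b2 idx (by omega) hidx
        rw [hgidx] at this
        omega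
      rw [pvSub_not_mem hnm]
    · rw [if_neg hend]
      have hlolen : lo < ps.length := by omega
      have hgd : PySem.List.pyGetD ps (lo : Int) 0 = ps[lo] := by
        rw [PySem.List.pyGetD_eq_getElem ps 0 (by omega) (by push_cast; omega)]
        simp
      rcases hmem lo hlolen with ⟨u, hu, hju, hcu⟩
      have hku : k ≤ u := by
        have := b3 lo (le_refl _) hlolen
        omega
      -- u is the first occurrence of c at an index ≥ k
      have hj : u - k < (sl.drop k).length := by simp; omega
      have hgetj : (sl.drop k)[u - k]'(hj) = c := by
        rw [List.getElem_drop]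
        have : k + (u - k) = u := by omega
        simp_rw [this]
        exact hcu
      have hminj : ∀ v, (hv : v < u - k) → (sl.drop k)[v]'(by omega) ≠ c := by
        intro v hv hEq
        have hvin : ((k + v : Nat) : Int) ∈ ps := by
          rw [hps, pvPos_mem]
          exact ⟨k + v, by omega, rfl, (List.getElem_drop (xs := sl)).symm.trans hEq⟩
        rcases List.getElem_of_mem hvin with ⟨idx, hidx, hgidx⟩
        -- ps[idx] = k+v < u = ps[lo], so by sortedness idx < lo, hence ps[idx] < k: contradiction
        have hlt : ps[idx] < ps[lo] := by rw [hgidx, hju]; omega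
        have hidxlo : idx < lo := by
          by_contra hge
          have := hsort lo idx (by omega) hidx
          omega
        have := b2 idx hidxlo hidx
        rw [hgidx] at this
        omega
      rw [pvSub_first hj hgetj hminj]
      rw [hgd, hju]
      have harg : ((u : Int) + 1) = ((u + 1 : Nat) : Int) := by push_cast; ring
      rw [harg, ih (u + 1) (by omega), List.drop_drop]
      congr 2
      omega

-- the first match in a key-sorted list is key-minimal among all matches
theorem pvFind?_min {p : String → Bool} : ∀ {es : List String},
    es.Pairwise (fun a b => pvK a ≤ pvK b) →
    ∀ {r}, es.find? p = some r → p r = true ∧ r ∈ es ∧ ∀ y ∈ es, p y = true → pvK r ≤ pvK y := by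
  intro es
  induction es with
  | nil => intro _ r h; simp at h
  | cons a es ih =>
    intro hpw r hr
    rcases List.pairwise_cons.mp hpw with ⟨ha, hpw'⟩
    by_cases hpa : p a = true
    · rw [List.find?_cons_of_pos hpa] at hr
      cases hr
      refine ⟨hpa, List.mem_cons_self, ?_⟩
      intro y hy _
      rcases List.mem_cons.mp hy with rfl | hy
      · exact le_refl _
      · exact ha y hy
    · rw [List.find?_cons_of_neg (by simpa using hpa)] at hr
      obtain ⟨h1, h2, h3⟩ := ih hpw' hr
      refine ⟨h1, List.mem_cons_of_mem _ h2, ?_⟩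
      intro y hy hpy
      rcases List.mem_cons.mp hy with rfl | hy
      · exact absurd hpy hpa
      · exact h3 y hy hpy

-- B's best-tracking fold returns a key-minimal match (or its initial value)
theorem pvFold_min (p : String → Bool) : ∀ (l : List String) (b : String),
    (l.foldl (fun best x => if decide (pvK x < pvK best) && p x then x else best) b = b
      ∨ (l.foldl (fun best x => if decide (pvK x < pvK best) && p x then x else best) b ∈ l
          ∧ p (l.foldl (fun best x => if decide (pvK x < pvK best) && p x then x else best) b) = true))
    ∧ pvK (l.foldl (fun best x => if decide (pvK x < pvK best) && p x then x else best) b) ≤ pvK b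
    ∧ ∀ y ∈ l, p y = true →
        pvK (l.foldl (fun best x => if decide (pvK x < pvK best) && p x then x else best) b) ≤ pvK y := by
  intro l
  induction l with
  | nil => intro b; exact ⟨Or.inl rfl, le_refl _, by simp⟩
  | cons x l ih =>
    intro b
    simp only [List.foldl_cons]
    by_cases hc : (decide (pvK x < pvK b) && p x) = true
    · rw [if_pos hc]
      obtain ⟨hcl, hcp⟩ := Bool.and_eq_true_iff.mp hc
      have hlt : pvK x < pvK b := of_decide_eq_true hcl
      obtain ⟨m1, m2, m3⟩ := ih x
      refine ⟨?_, le_trans m2 (le_of_lt hlt), ?_⟩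
      · rcases m1 with h | ⟨h, hp⟩
        · exact Or.inr ⟨by rw [h]; exact List.mem_cons_self, by rw [h]; exact hcp⟩
        · exact Or.inr ⟨List.mem_cons_of_mem _ h, hp⟩
      · intro y hy hpy
        rcases List.mem_cons.mp hy with rfl | hy
        · exact m2
        · exact m3 y hy hpy
    · rw [if_neg hc]
      obtain ⟨m1, m2, m3⟩ := ih b
      refine ⟨?_, m2, ?_⟩
      · rcases m1 with h | ⟨h, hp⟩
        · exact Or.inl h
        · exact Or.inr ⟨List.mem_cons_of_mem _ h, hp⟩
      · intro y hy hpy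
        rcases List.mem_cons.mp hy with rfl | hy
        · have : ¬ pvK y < pvK b := by
            intro hlt
            exact hc (by simp [hlt, hpy])
          exact le_trans m2 (le_of_not_gt this)
        · exact m3 y hy hpy

-- ===== VERDICT (by name: the statement is the Claim_ definition above) =====
theorem findLongestWord_1_spec : Claim_equal_findLongestWord_1 := by
  intro s d _
  simp only [Spec_findLongestWord_1, findLongestWord_1, findLongestWord_1_alt]
  have hpA : (fun x : String => pvIsSubA s x.toList 0)
      = fun x : String => pvSub x.toList s.toList := by
    funext x
    have := pvIsSubA_eq s x.toList 0 (by omega)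
    simpa using this
  have hstep : (fun (best x : String) =>
      if (decide (PySem.Str.len x > PySem.Str.len best)
            || (PySem.Str.len x == PySem.Str.len best && decide (x < best)))
          && pvIsSubB (pvPos s.toList) x.toList 0 then x else best)
      = fun best x => if decide (pvK x < pvK best)
          && (fun x : String => pvSub x.toList s.toList) x then x else best := by
    funext best x
    rw [pvBetter_eq, show pvIsSubB (pvPos s.toList) x.toList 0 = pvSub x.toList s.toList from
      by simpa using pvIsSubB_eq s.toList x.toList 0 (by omega)]
  rw [hpA, hstep, pvSorted2_eq]
  set p : String → Bool := fun x : String => pvSub x.toList s.toList with hp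
  set q := d.foldl (fun best x => if decide (pvK x < pvK best) && p x then x else best) "" with hq
  obtain ⟨mB1, mB2, mB3⟩ := pvFold_min p d ""
  rw [← hq] at mB1 mB2 mB3
  have hpe : p "" = true := by simp [hp, pvSub]
  rw [List.find?_append]
  cases hA : List.find? p (PySem.List.sorted d pvK) with
  | some r =>
    obtain ⟨h1, h2, h3⟩ := pvFind?_min (PySem.List.sorted_pairwise d pvK) hA
    have hrd : r ∈ d := (PySem.List.mem_sorted _ _ _ _).mp h2
    have hq1 : pvK q ≤ pvK r := mB3 r hrd h1
    have hq2 : pvK r ≤ pvK q := by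
      rcases mB1 with hqe | ⟨hqd, hqp⟩
      · rw [hqe]; exact pvK_le_top r
      · exact h3 q ((PySem.List.mem_sorted _ _ _ _).mpr hqd) hqp
    simpa using pvK_inj (le_antisymm hq2 hq1)
  | none =>
    have hnone : ∀ y ∈ d, ¬ p y = true := by
      intro y hy
      exact List.find?_eq_none.mp hA y ((PySem.List.mem_sorted _ _ _ _).mpr hy)
    rcases mB1 with hqe | ⟨hqd, hqp⟩
    · simp [List.find?_cons_of_pos hpe, hqe]
    · exact absurd hqp (hnone q hqd)
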